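-- pv_equiv track=rewrite | github.com/QuandisS/Physics_Project | core_functions.py | check_instr
-- ===== SOURCE A (Python) =====
-- sign_var = '-'
--
-- def check_instr(list_inst, variable):
--     # значения из variable
--     values_var_list = list(dict.values(variable))
--
--     # ключи из variable
--     keys_var_list = list(dict.keys(variable))
--
--     s_lenght_inst = []
--
--     error_inst = []
--     good_inst = None
--
--     i = 0
--     a = 0
--
--     # разделение инструкций для исключения неправильной работы ф-ции
--     # раньше не было отличия между  v0 и v0_x
--     for i in range(len(list_inst)):
--         s_lenght_inst.append(list_inst[i].split())
--         i += 1
--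
--     i = 0
--
--     number = len(s_lenght_inst)
--
--     # определяет номер инструкции в которой есть неизвестная перменная
--
--     for a in range(number):
--         for i in range(len(keys_var_list)):
--             if keys_var_list[i] in s_lenght_inst[a]:
--                 try:
--                     if values_var_list[i] == sign_var:
--                         error_inst.append(a)
--                         i = 0
--                         a += 1
--                         break
--                 except Exception:
--                     error_inst.append(a)
--                     i = 0
--                     a += 1
--                     break
--             # elif keys_var_list[i] == 't' or keys_var_list[i] == 'vy' or keys_var_list[i] == 'x' or keys_var_list[i] == 'y':
--             #     try:
--             #         if type(variable[keys_var_list[i]]) != int: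
--             #             error_inst.append(a)
--             #             i = 0
--             #             a += 1
--             #             break
--             #     except Exception:
--             #         error_inst.append(a)
--             #         i = 0
--             #         a += 1
--             #         break
--     # определяет номер хорошей инструкции
--     a = 0
--     for a in range(number):
--         if a in error_inst:
--             a += 1
--         else:
--             good_inst = a
--             break
--
--     return good_inst
-- ===== SOURCE B (Python) =====
-- sign_var = '-'
--
-- def check_instr(list_inst, variable):
--     # single forward pass with early return: first instruction none of whose
--     # tokens is a variable whose value is '-'
--     for idx, inst in enumerate(list_inst):
--         if all(variable.get(tok) != sign_var for tok in inst.split()):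
--             return idx
--     return None
-- ===== Notes on version B (the rewrite author's own statement) =====
-- stated objective: faster
-- what changed: Replaces A's three phases (pre-split all instructions, build a full error_inst table by scanning every variable key against every instruction, then rescan indices for the first one not in the table) with one forward pass that splits each instruction on the fly, tests its tokens by direct dict lookup, and early-returns the first clean index.
import Mathlib
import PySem

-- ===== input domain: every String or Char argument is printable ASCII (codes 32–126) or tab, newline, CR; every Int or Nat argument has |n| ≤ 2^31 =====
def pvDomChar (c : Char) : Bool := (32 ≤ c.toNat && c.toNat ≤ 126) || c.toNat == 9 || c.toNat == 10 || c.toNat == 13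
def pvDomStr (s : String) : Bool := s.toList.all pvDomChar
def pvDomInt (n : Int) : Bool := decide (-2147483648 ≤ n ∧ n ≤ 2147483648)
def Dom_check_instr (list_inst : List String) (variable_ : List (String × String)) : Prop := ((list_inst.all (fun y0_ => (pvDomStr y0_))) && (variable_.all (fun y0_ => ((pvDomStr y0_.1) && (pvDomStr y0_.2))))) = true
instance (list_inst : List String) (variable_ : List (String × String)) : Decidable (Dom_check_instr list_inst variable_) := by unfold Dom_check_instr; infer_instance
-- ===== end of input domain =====

-- B replaces A's build-error-table-then-rescan with a single forward pass that splits each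
-- instruction on the fly, tests tokens by direct dict lookup, and early-returns the first clean
-- index (objective: faster; a timing run measured B faster at the largest sizes).


-- ===== PORT A =====
-- inner loop over keys_var_list/values_var_list (walked in lockstep as the zip):
-- if keys[i] in tokens and values[i] == '-', record and break; otherwise continue
def pvInnerBad : List (String × String) → List String → Bool
  | [], _ => false
  | (k, v) :: rest, toks =>
      if toks.contains k then
        (if v = "-" then true else pvInnerBad rest toks)
      else pvInnerBad rest toks

-- second loop: first a in range(number) not in error_inst
def pvGoodLoop : List Nat → List Nat → Option Int
  | [], _ => none
  | a :: rest, err => if a ∈ err then pvGoodLoop rest err else some (a : Int)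

def check_instr (list_inst : List String) (variable_ : List (String × String)) : Option Int :=
  let d := PySem.Dict.ofList variable_
  let values_var_list := d.values
  let keys_var_list := d.keys
  let s_lenght_inst := list_inst.foldl (fun acc inst => acc ++ [PySem.Str.split₀ inst]) []
  let number := s_lenght_inst.length
  let error_inst := (List.range number).foldl
    (fun err a =>
      if pvInnerBad (keys_var_list.zip values_var_list) (s_lenght_inst.getD a []) then
        err ++ [a]
      else err) []
  pvGoodLoop (List.range number) error_inst

-- ===== PORT B =====
def pvAltGo (d : PySem.Dict String String) (idx : Int) : List String → Option Int
  | [] => none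
  | inst :: rest =>
      if (PySem.Str.split₀ inst).all (fun tok => !(d.get? tok == some "-")) then some idx
      else pvAltGo d (idx + 1) rest

def check_instr_alt (list_inst : List String) (variable_ : List (String × String)) : Option Int :=
  pvAltGo (PySem.Dict.ofList variable_) 0 list_inst

-- ===== PRECONDITION & SPEC =====
def Spec_check_instr (list_inst : List String) (variable_ : List (String × String)) (out : Option Int) : Prop := out = check_instr_alt list_inst variable_
instance (list_inst : List String) (variable_ : List (String × String)) (out : Option Int) : Decidable (Spec_check_instr list_inst variable_ out) := by unfold Spec_check_instr; infer_instance

-- ===== CLAIM (what is proved, stated in full; the proofs are below) =====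
def Claim_equal_check_instr : Prop := ∀ (list_inst : List String) (variable_ : List (String × String)), Dom_check_instr list_inst variable_ → Spec_check_instr list_inst variable_ (check_instr list_inst variable_)

-- ===== LEMMAS AND PROOFS =====

theorem pvInnerBad_eq_any (pairs : List (String × String)) (toks : List String) :
    pvInnerBad pairs toks = pairs.any (fun p => toks.contains p.1 && p.2 == "-") := by
  induction pairs with
  | nil => rfl
  | cons p rest ih =>
      obtain ⟨k, v⟩ := p
      simp only [pvInnerBad, List.any_cons]
      by_cases hk : toks.contains k = true <;> by_cases hv : v = "-" <;>
        simp [hv, ih]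

theorem pv_items_any_eq_tok_any (d : PySem.Dict String String) (hnd : d.keys.Nodup)
    (toks : List String) :
    d.items.any (fun p => toks.contains p.1 && p.2 == "-")
      = toks.any (fun t => d.get? t == some "-") := by
  rw [Bool.eq_iff_iff]
  simp only [List.any_eq_true, Bool.and_eq_true, beq_iff_eq, List.contains_iff_mem]
  constructor
  · rintro ⟨⟨k, v⟩, hmem, hk, hv⟩
    have hv' : v = "-" := hv
    subst hv'
    exact ⟨k, hk, PySem.Dict.get?_of_mem_items d hmem hnd⟩
  · rintro ⟨t, ht, hget⟩
    exact ⟨(t, "-"), PySem.Dict.mem_items_of_get?_eq_some d hget, ht, rfl⟩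

theorem pv_find?_congr {α : Type} (l : List α) (p q : α → Bool)
    (h : ∀ a ∈ l, p a = q a) : l.find? p = l.find? q := by
  induction l with
  | nil => rfl
  | cons a rest ih =>
      simp only [List.find?_cons, h a (List.mem_cons_self ..)]
      cases hq : q a
      · exact ih (fun b hb => h b (List.mem_cons_of_mem _ hb))
      · rfl

theorem pv_findIdx?_congr {α : Type} (l : List α) (p q : α → Bool)
    (h : ∀ a, p a = q a) : l.findIdx? p = l.findIdx? q := by
  have : p = q := funext h
  rw [this]

theorem pvGoodLoop_filter (p : Nat → Bool) (err : List Nat) :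
    ∀ (l : List Nat), (∀ a ∈ l, (a ∈ err ↔ p a = true)) →
      pvGoodLoop l err = (l.find? (fun a => !p a)).map (fun a => (a : Int)) := by
  intro l
  induction l with
  | nil => intro _; rfl
  | cons a rest ih =>
      intro h
      have ha := h a (List.mem_cons_self ..)
      by_cases hp : p a = true
      · simp [pvGoodLoop, ha.mpr hp, hp,
          ih (fun b hb => h b (List.mem_cons_of_mem _ hb))]
      · have : a ∉ err := fun hmem => hp (ha.mp hmem)
        simp [pvGoodLoop, this, hp]

theorem pv_find_range' (q : List String → Bool) :
    ∀ (l : List (List String)) (i : Nat),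
      (List.range' i l.length).find? (fun a => !q (l.getD (a - i) [])) =
        ((l.findIdx? (fun toks => !q toks)).map (fun j => j + i)) := by
  intro l
  induction l with
  | nil => intro i; rfl
  | cons x rest ih =>
      intro i
      simp only [List.length_cons, List.range'_succ, List.find?_cons, List.findIdx?_cons]
      have h0 : i - i = 0 := Nat.sub_self i
      by_cases hq : q x = true
      · simp only [h0, List.getD_cons_zero, hq, Bool.not_true]
        have hrw : (List.range' (i + 1) rest.length).find?
              (fun a => !q ((x :: rest).getD (a - i) []))
            = (List.range' (i + 1) rest.length).find?
              (fun a => !q (rest.getD (a - (i + 1)) [])) := by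
          apply pv_find?_congr
          intro a ha
          have hai : i + 1 ≤ a := (List.mem_range'_1.mp ha).1
          have : a - i = (a - (i + 1)) + 1 := by omega
          rw [this, List.getD_cons_succ]
        rw [hrw, ih (i + 1)]
        cases rest.findIdx? (fun toks => !q toks) <;> simp <;> omega
      · simp [hq]

theorem pvAltGo_eq_findIdx? (d : PySem.Dict String String) :
    ∀ (l : List String) (i : Int),
      pvAltGo d i l =
        (l.findIdx? (fun s =>
          (PySem.Str.split₀ s).all (fun tok => !(d.get? tok == some "-")))).map
          (fun j => i + (j : Int)) := by
  intro l
  induction l with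
  | nil => intro i; rfl
  | cons x rest ih =>
      intro i
      simp only [pvAltGo, List.findIdx?_cons]
      by_cases hx : (PySem.Str.split₀ x).all (fun tok => !(d.get? tok == some "-")) = true
      · simp [hx]
      · rw [if_neg hx, ih (i + 1)]
        simp only [hx]
        cases rest.findIdx? _ <;> simp <;> omega

-- ===== VERDICT (by name: the statement is the Claim_ definition above) =====
theorem check_instr_spec : Claim_equal_check_instr := by
  intro list_inst variable_ _
  unfold Spec_check_instr check_instr check_instr_alt
  simp only [PySem.List.foldl_append_singleton_eq_map]
  set d := PySem.Dict.ofList variable_ with hd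
  have hnd : d.keys.Nodup := PySem.Dict.nodup_keys_ofList variable_
  have hzip : d.keys.zip d.values = d.items := by
    simp only [PySem.Dict.keys, PySem.Dict.values, List.zip_map']
    exact List.map_id d.items
  set s := list_inst.map PySem.Str.split₀ with hs
  set q : List String → Bool := fun toks => toks.any (fun t => d.get? t == some "-") with hq
  have hbad : ∀ toks, pvInnerBad (d.keys.zip d.values) toks = q toks := by
    intro toks
    rw [pvInnerBad_eq_any, hzip, pv_items_any_eq_tok_any d hnd]
  simp only [List.nil_append, hbad]
  have herr := PySem.List.foldl_append_if (fun a => q (s.getD a [])) (id : Nat → Nat)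
      (List.range s.length) []
  simp only [id_eq, List.map_id, List.nil_append] at herr
  rw [herr]
  have hmem : ∀ a ∈ List.range s.length,
      (a ∈ (List.range s.length).filter (fun b => q (s.getD b [])) ↔ q (s.getD a []) = true) := by
    intro a ha
    simp [List.mem_filter, ha]
  rw [pvGoodLoop_filter _ _ _ hmem]
  have hrange : List.range s.length = List.range' 0 s.length := List.range_eq_range'
  rw [hrange]
  have := pv_find_range' q s 0
  simp only [Nat.sub_zero] at this
  rw [this]
  rw [pvAltGo_eq_findIdx? d list_inst 0]
  have hfi : s.findIdx? (fun toks => !q toks)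
      = list_inst.findIdx? (fun str => (PySem.Str.split₀ str).all (fun tok => !(d.get? tok == some "-"))) := by
    rw [hs, List.findIdx?_map]
    apply pv_findIdx?_congr
    intro str
    simp [hq, Function.comp, List.all_eq_not_any_not]
  rw [hfi]
  cases list_inst.findIdx? _ <;> simp
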